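-- pv_equiv track=rewrite | github.com/BrianLi009/PhysicsCheck_log | candidates/read.py | degree_sequence
-- ===== SOURCE A (Python) =====
-- def degree_sequence(M, n):
--     st = ""
--     for i in range(n):
--         rowsum = 0
--         for j in range(n):
--             if i > j:
--                 rowsum += M[j][i]
--             else:
--                 rowsum += M[i][j]
--         st += str(rowsum) + " "
--     return st[:-1]
-- ===== SOURCE B (Python) =====
-- def degree_sequence(M, n):
--     deg = [0] * n
--     for i in range(n):
--         row = M[i]
--         for j in range(i, n):
--             deg[i] += row[j]
--             if j != i:
--                 deg[j] += row[j]
--     return ' '.join(map(str, deg))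
-- ===== Notes on version B (the rewrite author's own statement) =====
-- stated objective: alternative
-- what changed: B makes a single pass over the upper triangle of M, accumulating each stored entry into the two degrees it contributes to in a degrees array, then joins; A recomputes each degree by a full-row scan with an i>j branch and builds the string with a trailing-space slice.
import Mathlib
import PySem

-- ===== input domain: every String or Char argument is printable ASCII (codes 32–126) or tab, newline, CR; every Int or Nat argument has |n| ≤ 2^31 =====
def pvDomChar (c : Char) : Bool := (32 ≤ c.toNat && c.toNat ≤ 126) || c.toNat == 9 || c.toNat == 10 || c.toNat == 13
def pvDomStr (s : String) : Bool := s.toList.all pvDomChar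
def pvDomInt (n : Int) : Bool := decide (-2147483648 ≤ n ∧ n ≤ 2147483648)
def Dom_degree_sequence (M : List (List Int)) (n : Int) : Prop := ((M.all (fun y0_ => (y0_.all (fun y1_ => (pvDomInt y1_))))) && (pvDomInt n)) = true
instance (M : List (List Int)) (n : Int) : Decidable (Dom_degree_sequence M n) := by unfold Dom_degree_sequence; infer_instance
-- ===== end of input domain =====

-- B accumulates each upper-triangle entry into the two degrees it contributes to in one pass
-- (degrees array + join), instead of A's per-degree full-row scan with an i>j branch and a
-- trailing-space slice; same asymptotic cost, each stored entry is read once instead of twice.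

-- ===== PORT A =====
def degree_sequence (M : List (List Int)) (n : Int) : String :=
  let st : String :=
    (PySem.List.pyRange 0 n 1).foldl (fun st i =>
      let rowsum : Int :=
        (PySem.List.pyRange 0 n 1).foldl (fun rowsum j =>
          if i > j then rowsum + PySem.List.pyGetD (PySem.List.pyGetD M j []) i 0
          else rowsum + PySem.List.pyGetD (PySem.List.pyGetD M i []) j 0) 0
      st ++ PySem.Int.toStr rowsum ++ " ") ""
  PySem.Str.slice st none (some (-1))

-- ===== PORT B =====
def degree_sequence_alt (M : List (List Int)) (n : Int) : String :=
  let deg0 : List Int := List.replicate n.toNat 0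
  let deg :=
    (PySem.List.pyRange 0 n 1).foldl (fun deg i =>
      let row := PySem.List.pyGetD M i []
      (PySem.List.pyRange i n 1).foldl (fun deg j =>
        let v := PySem.List.pyGetD row j 0
        let deg2 := PySem.List.pySetD deg i (PySem.List.pyGetD deg i 0 + v)
        if j ≠ i then PySem.List.pySetD deg2 j (PySem.List.pyGetD deg2 j 0 + v) else deg2) deg) deg0
  PySem.Str.join " " (deg.map PySem.Int.toStr)

-- ===== PRECONDITION & SPEC =====
-- Pre_ excludes exactly the inputs where Python A raises IndexError: for n > 0 it reads
-- M[r][c] for all r,c < n, so M needs at least n rows and each of the first n rows length ≥ n.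
def Pre_degree_sequence (M : List (List Int)) (n : Int) : Prop :=
  n.toNat ≤ M.length ∧ ∀ row ∈ M.take n.toNat, n.toNat ≤ row.length
instance (M : List (List Int)) (n : Int) : Decidable (Pre_degree_sequence M n) := by
  unfold Pre_degree_sequence; infer_instance
def pvWitness_degree_sequence : List (List Int) × Int := ([[0, 1], [1, 0]], 2)

def Spec_degree_sequence (M : List (List Int)) (n : Int) (out : String) : Prop := out = degree_sequence_alt M n
instance (M : List (List Int)) (n : Int) (out : String) : Decidable (Spec_degree_sequence M n out) := by unfold Spec_degree_sequence; infer_instance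

-- ===== CLAIM (what is proved, stated in full; the proofs are below) =====
def Claim_equal_degree_sequence : Prop := ∀ (M : List (List Int)) (n : Int), Dom_degree_sequence M n → Pre_degree_sequence M n → Spec_degree_sequence M n (degree_sequence M n)

-- ===== LEMMAS AND PROOFS =====

-- entry read by both programs (both ports read through defaults, so it is total)
def pvG (M : List (List Int)) (a b : Nat) : Int := (M.getD a []).getD b 0
-- A's rowsum for row i (the degree)
def pvDeg (M : List (List Int)) (n0 i : Nat) : Int :=
  ((List.range n0).map (fun j => if j < i then pvG M j i else pvG M i j)).sum
-- partial column sum: contributions of rows r < s to degree k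
def pvCol (M : List (List Int)) (s k : Nat) : Int :=
  ((List.range s).map (fun r => pvG M r k)).sum
-- tail-of-row sum for row i starting at column s, m columns
def pvRowTail (M : List (List Int)) (i s m : Nat) : Int :=
  ((List.range' s m).map (pvG M i)).sum
-- B's inner-loop body on Nat indices
def pvStep (M : List (List Int)) (i : Nat) (deg : List Int) (j : Nat) : List Int :=
  let v := (M.getD i []).getD j 0
  let deg2 := deg.set i (deg.getD i 0 + v)
  if j ≠ i then deg2.set j (deg2.getD j 0 + v) else deg2

lemma pv_getD_set (l : List Int) (i j : Nat) (v d : Int) :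
    (l.set i v).getD j d = if i = j ∧ i < l.length then v else l.getD j d := by
  simp only [List.getD_eq_getElem?_getD, List.getElem?_set]
  by_cases hij : i = j
  · subst hij
    by_cases hil : i < l.length <;> simp [hil]
  · simp [hij]

lemma pv_pyRange_zero (n : Int) :
    PySem.List.pyRange 0 n 1 = (List.range n.toNat).map (Nat.cast : Nat → Int) := by
  rw [PySem.List.pyRange_one]
  norm_num

lemma pv_pyRange_seg (s : Nat) (n : Int) :
    PySem.List.pyRange (s : Int) n 1 = (List.range' s (n.toNat - s)).map (Nat.cast : Nat → Int) := by
  rw [PySem.List.pyRange_one]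
  have h : (n - (s : Int)).toNat = n.toNat - s := by omega
  rw [h, List.range'_eq_map_range, List.map_map]
  apply List.map_congr_left
  intro k _
  simp only [Function.comp_apply]
  omega

lemma pv_rowtail_succ (M : List (List Int)) (i s m : Nat) :
    pvRowTail M i s (m + 1) = pvG M i s + pvRowTail M i (s + 1) m := by
  simp [pvRowTail, List.range'_succ]

lemma pv_col_succ (M : List (List Int)) (s k : Nat) :
    pvCol M (s + 1) k = pvCol M s k + pvG M s k := by
  simp [pvCol, List.range_succ]

-- splitting A's rowsum at the diagonal
lemma pv_split (M : List (List Int)) (n0 s : Nat) (h : s ≤ n0) :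
    pvDeg M n0 s = pvCol M s s + pvRowTail M s s (n0 - s) := by
  unfold pvDeg pvCol pvRowTail
  have hr : List.range n0 = List.range' 0 s ++ List.range' s (n0 - s) := by
    have hsum : s + (n0 - s) = n0 := by omega
    have happ := List.range'_append (s := 0) (m := s) (n := n0 - s) (step := 1)
    simp only [Nat.zero_add, Nat.one_mul, hsum] at happ
    rw [List.range_eq_range', ← happ]
  rw [hr, List.map_append, List.sum_append, ← List.range_eq_range']
  congr 1
  · apply congrArg
    apply List.map_congr_left
    intro j hj
    simp only [List.mem_range] at hj
    simp [hj]
  · apply congrArg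
    apply List.map_congr_left
    intro j hj
    have := List.mem_range'.mp hj
    have : ¬ j < s := by omega
    simp [this]

-- effect of one pvStep on every slot
lemma pv_step_getD (M : List (List Int)) (i s k : Nat) (deg : List Int)
    (hi : i < deg.length) (hs : s < deg.length) :
    (pvStep M i deg s).getD k 0 = deg.getD k 0 + (if k = i ∨ k = s then (M.getD i []).getD s 0 else 0) := by
  unfold pvStep
  by_cases hsi : s = i
  · subst hsi
    rw [if_neg (by simp), pv_getD_set]
    by_cases hks : k = s
    · subst hks; simp [hs]
    · have h1 : ¬ (s = k ∧ s < deg.length) := fun h => hks h.1.symm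
      have h2 : ¬ (k = s ∨ k = s) := by tauto
      rw [if_neg h1, if_neg h2]
      simp
  · rw [if_pos hsi]
    simp only [pv_getD_set, List.length_set]
    have his : ¬ i = s := fun h => hsi h.symm
    by_cases hks : k = s
    · subst hks
      simp [hs, his]
    · have hsk : ¬ s = k := fun h => hks h.symm
      by_cases hki : k = i
      · subst hki
        simp [hsk, hi]
      · have hik : ¬ i = k := fun h => hki h.symm
        simp [hsk, hik, hks, hki]

lemma pv_step_length (M : List (List Int)) (i s : Nat) (deg : List Int) :
    (pvStep M i deg s).length = deg.length := by
  unfold pvStep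
  by_cases h : s = i <;> simp [h]

-- B's inner loop: row i, columns s..n0-1
lemma pv_inner (M : List (List Int)) (n0 i : Nat) :
    ∀ (m s : Nat) (deg : List Int), s + m = n0 → i ≤ s → i < n0 → deg.length = n0 →
      ((List.range' s m).foldl (pvStep M i) deg).length = n0 ∧
      ∀ k, k < n0 → ((List.range' s m).foldl (pvStep M i) deg).getD k 0
          = deg.getD k 0 + (if k = i then pvRowTail M i s m else if s ≤ k then pvG M i k else 0) := by
  intro m
  induction m with
  | zero =>
    intro s deg hsm his hin hlen
    refine ⟨hlen, ?_⟩
    intro k hk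
    have h1 : ¬ s ≤ k := by omega
    by_cases hki : k = i
    · simp [hki, pvRowTail]
    · simp [hki, h1]
  | succ m ih =>
    intro s deg hsm his hin hlen
    rw [List.range'_succ, List.foldl_cons]
    have hs : s < n0 := by omega
    have hlen' : (pvStep M i deg s).length = n0 := by rw [pv_step_length]; exact hlen
    obtain ⟨hl, hv⟩ := ih (s + 1) (pvStep M i deg s) (by omega) (by omega) hin hlen'
    refine ⟨hl, ?_⟩
    intro k hk
    rw [hv k hk, pv_step_getD M i s k deg (by omega) (by omega), pv_rowtail_succ]
    by_cases hki : k = i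
    · subst hki
      simp only [ite_true, true_or]
      simp [pvG]
      ring
    · by_cases hks : k = s
      · subst hks
        have h1 : ¬ (k + 1 ≤ k) := by omega
        simp [hki, h1, pvG]
      · have h3 : (s + 1 ≤ k) = (s ≤ k) := by
          apply propext; omega
        simp [hki, hks, h3]

-- B's outer loop keeps: slots below s are finished degrees, slots above hold partial column sums
lemma pv_outer (M : List (List Int)) (n0 : Nat) :
    ∀ (m s : Nat) (deg : List Int), s + m = n0 → deg.length = n0 →
      (∀ k, k < n0 → deg.getD k 0 = if k < s then pvDeg M n0 k else pvCol M s k) →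
      ((List.range' s m).foldl
          (fun deg i0 => (List.range' i0 (n0 - i0)).foldl (pvStep M i0) deg) deg).length = n0 ∧
      ∀ k, k < n0 → ((List.range' s m).foldl
          (fun deg i0 => (List.range' i0 (n0 - i0)).foldl (pvStep M i0) deg) deg).getD k 0
          = pvDeg M n0 k := by
  intro m
  induction m with
  | zero =>
    intro s deg hsm hlen hinv
    refine ⟨hlen, ?_⟩
    intro k hk
    have : k < s := by omega
    simpa [this] using hinv k hk
  | succ m ih =>
    intro s deg hsm hlen hinv
    rw [List.range'_succ, List.foldl_cons]
    have hs : s < n0 := by omega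
    obtain ⟨hl, hv⟩ := pv_inner M n0 s (n0 - s) s deg (by omega) (le_refl s) hs hlen
    apply ih (s + 1) _ (by omega) hl
    intro k hk
    rw [hv k hk, hinv k hk]
    by_cases hks : k = s
    · subst hks
      rw [if_neg (lt_irrefl k), if_pos rfl, if_pos (by omega : k < k + 1),
        pv_split M n0 k (by omega)]
    · by_cases hklt : k < s
      · have h1 : k < s + 1 := by omega
        have h2 : ¬ s ≤ k := by omega
        simp [hklt, h1, hks, h2]
      · have h1 : ¬ k < s := by omega
        have h2 : ¬ k < s + 1 := by omega
        have h3 : s ≤ k := by omega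
        simp [h1, h2, hks, h3, pv_col_succ]

-- B's folded degrees list is exactly the list of A's rowsums
lemma pv_B_deg (M : List (List Int)) (n : Int) :
    (PySem.List.pyRange 0 n 1).foldl (fun deg i =>
        let row := PySem.List.pyGetD M i []
        (PySem.List.pyRange i n 1).foldl (fun deg j =>
          let v := PySem.List.pyGetD row j 0
          let deg2 := PySem.List.pySetD deg i (PySem.List.pyGetD deg i 0 + v)
          if j ≠ i then PySem.List.pySetD deg2 j (PySem.List.pyGetD deg2 j 0 + v) else deg2) deg)
      (List.replicate n.toNat 0)
    = (List.range n.toNat).map (pvDeg M n.toNat) := by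
  have hfold :
      (PySem.List.pyRange 0 n 1).foldl (fun deg i =>
        let row := PySem.List.pyGetD M i []
        (PySem.List.pyRange i n 1).foldl (fun deg j =>
          let v := PySem.List.pyGetD row j 0
          let deg2 := PySem.List.pySetD deg i (PySem.List.pyGetD deg i 0 + v)
          if j ≠ i then PySem.List.pySetD deg2 j (PySem.List.pyGetD deg2 j 0 + v) else deg2) deg)
        (List.replicate n.toNat 0)
      = (List.range' 0 n.toNat).foldl
          (fun deg i0 => (List.range' i0 (n.toNat - i0)).foldl (pvStep M i0) deg)
          (List.replicate n.toNat 0) := by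
    rw [pv_pyRange_zero, List.foldl_map, List.range_eq_range']
    apply PySem.List.foldl_congr_mem
    intro deg i0 _
    rw [pv_pyRange_seg, List.foldl_map]
    apply PySem.List.foldl_congr_mem
    intro d j0 _
    simp only [pvStep, PySem.List.pyGetD_natCast, PySem.List.pySetD_natCast, ne_eq,
      Nat.cast_inj]
  rw [hfold]
  obtain ⟨hl, hv⟩ := pv_outer M n.toNat n.toNat 0 (List.replicate n.toNat 0) (by omega)
      (by simp) (by intro k hk; simp [pvCol])
  apply List.ext_getElem (by simpa using hl)
  intro k h1 h2
  have hk : k < n.toNat := by simpa using h2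
  have hres := hv k hk
  rw [List.getD_eq_getElem _ _ h1] at hres
  rw [hres]
  simp

-- A's inner fold is pvDeg
lemma pv_rowsumA (M : List (List Int)) (n : Int) (i : Nat) :
    (PySem.List.pyRange 0 n 1).foldl (fun rowsum j =>
        if (i : Int) > j then rowsum + PySem.List.pyGetD (PySem.List.pyGetD M j []) (i : Int) 0
        else rowsum + PySem.List.pyGetD (PySem.List.pyGetD M (i : Int) []) j 0) 0
      = pvDeg M n.toNat i := by
  rw [pv_pyRange_zero, List.foldl_map]
  have hfn : (fun (rowsum : Int) (k : Nat) =>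
      if (i : Int) > (k : Int) then rowsum + PySem.List.pyGetD (PySem.List.pyGetD M (k : Int) []) (i : Int) 0
      else rowsum + PySem.List.pyGetD (PySem.List.pyGetD M (i : Int) []) (k : Int) 0)
      = fun rowsum k => rowsum + (if k < i then pvG M k i else pvG M i k) := by
    funext r k
    by_cases h : k < i
    · have : (k : Int) < (i : Int) := by exact_mod_cast h
      simp [pvG, h, this]
    · have : ¬ ((k : Int) < (i : Int)) := by exact_mod_cast h
      simp [pvG, h, this]
  rw [hfn, PySem.List.foldl_add]
  simp [pvDeg]

lemma pv_str_ext (s t : String) (h : s.toList = t.toList) : s = t := by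
  have := congrArg String.ofList h
  simpa using this

-- A's string fold, on the character-list side
lemma pv_strA (f : Nat → Int) :
    ∀ (l : List Nat) (s : String),
      (l.foldl (fun st i0 => st ++ PySem.Int.toStr (f i0) ++ " ") s).toList
        = s.toList ++ (l.map (fun i0 => PySem.Int.toChars (f i0) ++ [' '])).flatten := by
  intro l
  induction l with
  | nil => intro s; simp
  | cons x xs ih =>
    intro s
    rw [List.foldl_cons, List.map_cons, List.flatten_cons, ih]
    simp [String.toList_append, PySem.Int.toList_toStr]

-- dropping the trailing separator of a 'chunk ++ sep' concatenation is join
lemma pv_join_drop : ∀ (cs : List (List Char)),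
    ((cs.map (fun c => c ++ [' '])).flatten).dropLast = PySem.Chars.join [' '] cs
  | [] => by simp [PySem.Chars.join_nil]
  | [c] => by simp [PySem.Chars.join_singleton]
  | c :: c' :: cs => by
    rw [List.map_cons, List.flatten_cons, List.dropLast_append]
    have hne : (((c' :: cs).map (fun c => c ++ [' '])).flatten).isEmpty = false := by
      simp [List.flatten_cons]
    rw [hne]
    simp only [Bool.false_eq_true]
    rw [pv_join_drop (c' :: cs), PySem.Chars.join_cons_cons]
    simp

-- ===== VERDICT (by name: the statement is the Claim_ definition above) =====
theorem degree_sequence_spec : Claim_equal_degree_sequence := by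
  intro M n _dom _pre
  unfold Spec_degree_sequence degree_sequence degree_sequence_alt
  simp only
  rw [pv_B_deg]
  have hA' :
      (PySem.List.pyRange 0 n 1).foldl (fun st i =>
          st ++ PySem.Int.toStr ((PySem.List.pyRange 0 n 1).foldl (fun rowsum j =>
            if i > j then rowsum + PySem.List.pyGetD (PySem.List.pyGetD M j []) i 0
            else rowsum + PySem.List.pyGetD (PySem.List.pyGetD M i []) j 0) 0) ++ " ") ""
        = (List.range n.toNat).foldl
            (fun st i0 => st ++ PySem.Int.toStr (pvDeg M n.toNat i0) ++ " ") "" := by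
    conv_lhs => rw [pv_pyRange_zero]
    rw [List.foldl_map]
    apply PySem.List.foldl_congr_mem
    intro st i0 _
    rw [← pv_pyRange_zero n, pv_rowsumA]
  apply pv_str_ext
  rw [PySem.Str.slice_to_neg_one, hA', pv_strA, PySem.Str.toList_join, List.map_map]
  have : (String.toList ∘ PySem.Int.toStr) = fun x => PySem.Int.toChars x := by
    funext x; simp [PySem.Int.toList_toStr]
  rw [this, List.map_map]
  have h1 : ("" : String).toList = [] := by decide
  have h2 : (" " : String).toList = [' '] := by decide
  rw [h1, List.nil_append, h2, ← pv_join_drop, List.map_map]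
  rfl
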